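-- pv_equiv track=rewrite | github.com/Dleifnesor/Nexus | nexus/core/script_generator.py | _parse_ai_script_response
-- ===== SOURCE A (Python) =====
-- def _parse_ai_script_response(response: str) -> str:
--     """Parse AI response to extract script content"""
--     # Remove any markdown code blocks
--     if "```" in response:
--         lines = response.split('\n')
--         in_code_block = False
--         script_lines = []
--
--         for line in lines:
--             if line.strip().startswith("```"):
--                 in_code_block = not in_code_block
--                 continue
--
--             if in_code_block:
--                 script_lines.append(line)
--
--         return '\n'.join(script_lines)
--
--     return response.strip()
-- ===== SOURCE B (Python) =====
-- def _parse_ai_script_response(response: str) -> str: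
--     """Parse AI response to extract script content"""
--     if "```" not in response:
--         return response.strip()
--     # Split the lines into segments separated by fence lines, then keep every
--     # other segment: those between fences 1&2, 3&4, ...; a trailing unpaired
--     # fence's segment is the last, odd-indexed one, so it is kept too.
--     groups = [[]]
--     for line in response.split('\n'):
--         if line.strip().startswith("```"):
--             groups.append([])
--         else:
--             groups[-1].append(line)
--     return '\n'.join(_alternate(groups))
--
--
-- def _alternate(groups):
--     """Concatenate groups[1], groups[3], groups[5], ..."""
--     if len(groups) < 2:
--         return []
--     return groups[1] + _alternate(groups[2:])
-- ===== Notes on version B (the rewrite author's own statement) =====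
-- stated objective: alternative
-- what changed: A tracks an in_code_block boolean toggle while scanning lines; B instead splits the lines into fence-separated segments (a list of groups) and keeps every other segment (groups[1], groups[3], ..., which also covers a trailing unpaired fence).
import Mathlib
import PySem

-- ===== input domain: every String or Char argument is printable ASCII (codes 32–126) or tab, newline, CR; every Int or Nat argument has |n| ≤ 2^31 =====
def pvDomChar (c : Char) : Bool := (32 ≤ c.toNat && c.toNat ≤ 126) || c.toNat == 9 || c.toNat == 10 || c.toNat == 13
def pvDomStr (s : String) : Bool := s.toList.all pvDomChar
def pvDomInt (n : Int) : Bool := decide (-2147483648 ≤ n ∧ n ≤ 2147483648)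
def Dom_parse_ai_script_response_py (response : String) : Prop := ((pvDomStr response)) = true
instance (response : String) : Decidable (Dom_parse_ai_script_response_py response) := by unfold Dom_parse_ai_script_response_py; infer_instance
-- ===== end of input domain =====

-- B replaces A's per-line toggle flag by splitting the lines into fence-separated
-- segments and keeping every other segment (objective: alternative decomposition).


-- ===== PORT A =====
def parse_ai_script_response_py (response : String) : String :=
  if PySem.Str.isIn "```" response then
    let lines := (PySem.Str.split? response "\n").getD []
    let st := lines.foldl (fun (s : Bool × List String) line =>
      if PySem.Str.startswith (PySem.Str.strip line) "```" then (!s.1, s.2)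
      else if s.1 then (s.1, s.2 ++ [line]) else s) (false, ([] : List String))
    PySem.Str.join "\n" st.2
  else
    PySem.Str.strip response

-- ===== PORT B =====
-- _alternate(groups): concatenation of groups[1], groups[3], ...
def pvAlternate : List (List String) → List String
  | [] => []
  | [_] => []
  | _ :: g :: rest => g ++ pvAlternate rest

def parse_ai_script_response_py_alt (response : String) : String :=
  if PySem.Str.isIn "```" response then
    let groups := ((PySem.Str.split? response "\n").getD []).foldl
      (fun (gs : List (List String)) line =>
        if PySem.Str.startswith (PySem.Str.strip line) "```" then gs ++ [[]]
        else gs.dropLast ++ [(gs.getLast?.getD []) ++ [line]]) [[]]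
    PySem.Str.join "\n" (pvAlternate groups)
  else
    PySem.Str.strip response

-- ===== PRECONDITION & SPEC =====
def Spec_parse_ai_script_response_py (response : String) (out : String) : Prop := out = parse_ai_script_response_py_alt response
instance (response : String) (out : String) : Decidable (Spec_parse_ai_script_response_py response out) := by unfold Spec_parse_ai_script_response_py; infer_instance

-- ===== CLAIM (what is proved, stated in full; the proofs are below) =====
def Claim_equal_parse_ai_script_response_py : Prop := ∀ (response : String), Dom_parse_ai_script_response_py response → Spec_parse_ai_script_response_py response (parse_ai_script_response_py response)

-- ===== LEMMAS AND PROOFS =====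

lemma pvAlternate_append_singleton (gs : List (List String)) (g : List String) :
    pvAlternate (gs ++ [g]) = pvAlternate gs ++ (if gs.length % 2 = 1 then g else []) := by
  induction gs using pvAlternate.induct with
  | case1 => simp [pvAlternate]
  | case2 a => simp [pvAlternate]
  | case3 a b rest ih =>
    have h2 : (rest.length + 1 + 1) % 2 = rest.length % 2 := by omega
    simp [pvAlternate, ih, h2]

lemma pv_loop_eq (lines : List String) :
    ∀ (gs : List (List String)) (b : Bool) (acc : List String),
      gs ≠ [] → b = decide (gs.length % 2 = 0) → acc = pvAlternate gs →
      (lines.foldl (fun (s : Bool × List String) line =>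
          if PySem.Str.startswith (PySem.Str.strip line) "```" then (!s.1, s.2)
          else if s.1 then (s.1, s.2 ++ [line]) else s) (b, acc)).2
        = pvAlternate (lines.foldl (fun (gs : List (List String)) line =>
            if PySem.Str.startswith (PySem.Str.strip line) "```" then gs ++ [[]]
            else gs.dropLast ++ [(gs.getLast?.getD []) ++ [line]]) gs) := by
  induction lines with
  | nil => intro gs b acc _ _ hacc; simpa using hacc
  | cons l rest ih =>
    intro gs b acc hne hb hacc
    rcases List.eq_nil_or_concat gs with rfl | ⟨ys, g, rfl⟩
    · exact absurd rfl hne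
    simp only [List.concat_eq_append] at hb hacc ⊢
    simp only [List.foldl_cons]
    by_cases hf : PySem.Str.startswith (PySem.Str.strip l) "```" = true
    · simp only [hf, if_true]
      refine ih _ _ _ (by simp) ?_ ?_
      · subst hb
        rcases Nat.mod_two_eq_zero_or_one ys.length with hy | hy <;>
          simp [List.length_append, Nat.add_mod, hy]
      · subst hacc
        rw [pvAlternate_append_singleton, pvAlternate_append_singleton,
            pvAlternate_append_singleton]
        simp
    · have hf' : PySem.Str.startswith (PySem.Str.strip l) "```" = false := by
        revert hf; cases PySem.Str.startswith (PySem.Str.strip l) "```" <;> simp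
      simp only [hf', Bool.false_eq_true, if_false]
      rw [show (ys ++ [g]).dropLast = ys by simp,
          show (ys ++ [g]).getLast?.getD [] = g by simp]
      rcases Nat.mod_two_eq_zero_or_one ys.length with hy | hy
      · have hb' : b = false := by
          subst hb; simp [List.length_append, Nat.add_mod, hy]
        subst hb'
        simp only [Bool.false_eq_true, if_false]
        refine ih _ _ _ (by simp) ?_ ?_
        · simp [List.length_append, Nat.add_mod, hy]
        · subst hacc
          rw [pvAlternate_append_singleton, pvAlternate_append_singleton]
          simp [hy]
      · have hb' : b = true := by
          subst hb; simp [List.length_append, Nat.add_mod, hy]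
        subst hb'
        simp only [if_true]
        refine ih _ _ _ (by simp) ?_ ?_
        · simp [List.length_append, Nat.add_mod, hy]
        · rw [pvAlternate_append_singleton] at hacc
          rw [pvAlternate_append_singleton]
          simp [hy] at hacc
          simp [hy, hacc]

-- ===== VERDICT (by name: the statement is the Claim_ definition above) =====
theorem parse_ai_script_response_py_spec : Claim_equal_parse_ai_script_response_py := by
  intro response _
  unfold Spec_parse_ai_script_response_py parse_ai_script_response_py parse_ai_script_response_py_alt
  by_cases h : PySem.Str.isIn "```" response = true
  · rw [if_pos h, if_pos h]
    exact congrArg (PySem.Str.join "\n")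
      (pv_loop_eq ((PySem.Str.split? response "\n").getD []) [[]] false [] (by simp) (by simp) rfl)
  · rw [if_neg h, if_neg h]
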